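-- pv_equiv track=rewrite | github.com/kskkry/brains_q3 | src/transform.py | num_element
-- ===== SOURCE A (Python) =====
-- def num_element(smile, element="c"):
--     """
--     原子の数を数えるだけ
--     微妙に上がるとのこと
--     """
--     count = 0
--     smile += "a"
--     for index, s in enumerate(smile):
--         if element == "c":
--             #要塩素の場合
--             if (s == "c" or s == "C") and smile[index+1] != "l":
--                 count += 1
--         elif element == "o":
--             if s == "o" or s == "O":
--                 count += 1
--         elif element == "n":
--             if s == "n" or s == "N":
--                 count += 1
--         elif element == "s":
--             if s == "S" or s == "s":
--                 count += 1
--         elif element == "cl":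
--             if (s == "l" and smile[index-1] == "C") or (s == "l" and smile[index-1] == "c"):
--                 count += 1
--         elif element == "br":
--             if (s == "B" and smile[index+1] == "r") or (s == "b" and smile[index+1] == "r"):
--                 count += 1
--         elif element == "f":
--             if s == "F" or s == "f":
--                 count += 1
--         elif element == "i":
--             if s == "I" or s == "i":
--                 count += 1
--         elif element == "na":
--             if (s == "N" and smile[index+1] == "a") or (s == "n" and smile[index+1] == "a"):
--                 count += 1
--
--     if element=="pt":
--         count = str(smile).count("Pt")
--         if count > 0:
--             count = 1
--     elif element=="sn":
--         count = str(smile).count("Sn")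
--         if count > 0:
--             count = 1
--     elif element=="@":
--         count = str(smile).count("@")
--         if count > 0:
--             count = 1
--
--     return count
-- ===== SOURCE B (Python) =====
-- def _pairs(s, firsts, second):
--     """Adjacent positions whose first char is in `firsts` and whose next char is `second`."""
--     return sum(1 for a, b in zip(s, s[1:]) if a in firsts and b == second)
--
--
-- def num_element(smile, element="c"):
--     if element == "c":
--         return sum(ch in "cC" for ch in smile) - _pairs(smile, "cC", "l")
--     if element == "o":
--         return sum(ch in "oO" for ch in smile)
--     if element == "n":
--         return sum(ch in "nN" for ch in smile)
--     if element == "s":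
--         return sum(ch in "sS" for ch in smile)
--     if element == "f":
--         return sum(ch in "fF" for ch in smile)
--     if element == "i":
--         return sum(ch in "iI" for ch in smile)
--     if element == "cl":
--         return _pairs(smile, "cC", "l")
--     if element == "br":
--         return _pairs(smile, "bB", "r")
--     if element == "na":
--         return _pairs(smile, "nN", "a")
--     if element == "pt":
--         return min(1, smile.count("Pt"))
--     if element == "sn":
--         return min(1, smile.count("Sn"))
--     if element == "@":
--         return min(1, smile.count("@"))
--     return 0
-- ===== Notes on version B (the rewrite author's own statement) =====
-- stated objective: simpler
-- what changed: Replaces A's sentinel-append plus enumerate/index-arithmetic scan with a dispatch to whole-string counts: per-character counts for single-letter elements, a zip-over-adjacent-pairs count for the two-character elements, and min(1, str.count) for Pt/Sn/@; the speedup is constant-factor, from C-level str operations instead of a per-character Python loop with indexing.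
-- intended difference: When element is "na" and smile ends with a lowercase or uppercase letter N, A's appended sentinel fabricates a phantom match and returns one more than the number of Na/na occurrences; B returns the true occurrence count, which is the intended value. — e.g. on num_element("CN", "na"): A returns 1, B returns 0
import Mathlib
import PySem

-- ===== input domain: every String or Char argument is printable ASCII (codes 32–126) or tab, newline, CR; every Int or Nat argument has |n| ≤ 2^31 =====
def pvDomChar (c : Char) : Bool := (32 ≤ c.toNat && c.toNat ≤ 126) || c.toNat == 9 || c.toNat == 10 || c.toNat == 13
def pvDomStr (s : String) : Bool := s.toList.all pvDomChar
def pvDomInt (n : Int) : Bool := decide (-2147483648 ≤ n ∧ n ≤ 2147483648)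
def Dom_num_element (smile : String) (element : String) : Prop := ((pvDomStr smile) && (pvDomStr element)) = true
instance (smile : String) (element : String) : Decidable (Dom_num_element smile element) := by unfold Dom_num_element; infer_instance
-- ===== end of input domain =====

-- B replaces A's sentinel-append + index-arithmetic scan by a dispatch to whole-string
-- character counts and a zip-over-adjacent-pairs count (simpler decomposition, no sentinel).

-- ===== PORT A =====
-- literal port of Source A's num_element; `smile += "a"` is ported on the code points:
-- t is (smile + "a") as a char list and smile[i] is PySem.List.pyGet? t i (always in
-- range where Python reaches it, because the short-circuited first conjunct fails at
-- the last position).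
def num_element (smile : String) (element : String) : Int :=
  let t : List Char := smile.toList ++ ['a']
  let count : Int :=
    (PySem.List.enumerate t 0).foldl (fun count is =>
      let index := is.1
      let s := is.2
      if element == "c" then
        if (s == 'c' || s == 'C') && !(PySem.List.pyGet? t (index + 1) == some 'l') then count + 1 else count
      else if element == "o" then
        if s == 'o' || s == 'O' then count + 1 else count
      else if element == "n" then
        if s == 'n' || s == 'N' then count + 1 else count
      else if element == "s" then
        if s == 'S' || s == 's' then count + 1 else count
      else if element == "cl" then
        if (s == 'l' && PySem.List.pyGet? t (index - 1) == some 'C') || (s == 'l' && PySem.List.pyGet? t (index - 1) == some 'c') then count + 1 else count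
      else if element == "br" then
        if (s == 'B' && PySem.List.pyGet? t (index + 1) == some 'r') || (s == 'b' && PySem.List.pyGet? t (index + 1) == some 'r') then count + 1 else count
      else if element == "f" then
        if s == 'F' || s == 'f' then count + 1 else count
      else if element == "i" then
        if s == 'I' || s == 'i' then count + 1 else count
      else if element == "na" then
        if (s == 'N' && PySem.List.pyGet? t (index + 1) == some 'a') || (s == 'n' && PySem.List.pyGet? t (index + 1) == some 'a') then count + 1 else count
      else count) 0
  if element == "pt" then
    let c : Int := (PySem.Chars.count t ['P', 't'] : Int)
    if c > 0 then 1 else c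
  else if element == "sn" then
    let c : Int := (PySem.Chars.count t ['S', 'n'] : Int)
    if c > 0 then 1 else c
  else if element == "@" then
    let c : Int := (PySem.Chars.count t ['@'] : Int)
    if c > 0 then 1 else c
  else count

-- ===== PORT B =====
-- port of Source B's _pairs: sum(1 for a, b in zip(s, s[1:]) if a in firsts and b == second)
-- (s[1:] on the code points is List.tail)
def pyPairs (s : List Char) (firsts : List Char) (second : Char) : Int :=
  ((s.zip s.tail).countP (fun ab => firsts.contains ab.1 && ab.2 == second) : Int)

-- port of Source B's num_element (dispatch on element, whole-string counts; no sentinel)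
def num_element_alt (smile : String) (element : String) : Int :=
  let s : List Char := smile.toList
  if element == "c" then
    (s.countP (fun ch => (['c', 'C'] : List Char).contains ch) : Int) - pyPairs s ['c', 'C'] 'l'
  else if element == "o" then
    (s.countP (fun ch => (['o', 'O'] : List Char).contains ch) : Int)
  else if element == "n" then
    (s.countP (fun ch => (['n', 'N'] : List Char).contains ch) : Int)
  else if element == "s" then
    (s.countP (fun ch => (['s', 'S'] : List Char).contains ch) : Int)
  else if element == "f" then
    (s.countP (fun ch => (['f', 'F'] : List Char).contains ch) : Int)
  else if element == "i" then
    (s.countP (fun ch => (['i', 'I'] : List Char).contains ch) : Int)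
  else if element == "cl" then
    pyPairs s ['c', 'C'] 'l'
  else if element == "br" then
    pyPairs s ['b', 'B'] 'r'
  else if element == "na" then
    pyPairs s ['n', 'N'] 'a'
  else if element == "pt" then
    min 1 ((PySem.Chars.count s ['P', 't'] : Int))
  else if element == "sn" then
    min 1 ((PySem.Chars.count s ['S', 'n'] : Int))
  else if element == "@" then
    min 1 ((PySem.Chars.count s ['@'] : Int))
  else 0

-- ===== PRECONDITION & SPEC =====
-- When element is "na" and smile ends with 'n' or 'N', A's appended sentinel "a" fabricates a
-- phantom "Na" match and A returns one more than the number of Na/na occurrences; B returns the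
-- true count, which is the intended value.
def D_num_element (smile : String) (element : String) : Prop :=
  element = "na" ∧ (smile.toList.getLast? = some 'n' ∨ smile.toList.getLast? = some 'N')
instance (smile : String) (element : String) : Decidable (D_num_element smile element) := by
  unfold D_num_element; infer_instance

def Spec_num_element (smile : String) (element : String) (out : Int) : Prop :=
  ¬ D_num_element smile element → out = num_element_alt smile element
instance (smile : String) (element : String) (out : Int) : Decidable (Spec_num_element smile element out) := by
  unfold Spec_num_element; infer_instance

def pvDiffWitness_num_element : String × String := ("CN", "na")
def pvDiffWitnessOut_num_element : Int × Int := (1, 0)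

-- ===== CLAIM (what is proved, stated in full; the proofs are below) =====
def Claim_unchanged_num_element : Prop := ∀ (smile : String) (element : String), Dom_num_element smile element → Spec_num_element smile element (num_element smile element)
def Claim_changed_num_element : Prop := Dom_num_element (pvDiffWitness_num_element.1) (pvDiffWitness_num_element.2) ∧ D_num_element (pvDiffWitness_num_element.1) (pvDiffWitness_num_element.2) ∧ num_element (pvDiffWitness_num_element.1) (pvDiffWitness_num_element.2) = pvDiffWitnessOut_num_element.1 ∧ num_element_alt (pvDiffWitness_num_element.1) (pvDiffWitness_num_element.2) = pvDiffWitnessOut_num_element.2 ∧ pvDiffWitnessOut_num_element.1 ≠ pvDiffWitnessOut_num_element.2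
def Claim_exact_num_element : Prop := ∀ (smile : String) (element : String), Dom_num_element smile element → D_num_element smile element → num_element smile element ≠ num_element_alt smile element

-- ===== LEMMAS AND PROOFS =====

-- ---- specs of one pass of A's loop, looking at the NEXT / PREVIOUS character ----
def nextSpec (Q : Char → Option Char → Bool) : List Char → Int
  | [] => 0
  | a :: r => (if Q a r.head? then 1 else 0) + nextSpec Q r

def prevSpec (R : Char → Option Char → Bool) : Option Char → List Char → Int
  | _, [] => 0
  | prev, a :: r => (if R a prev then 1 else 0) + prevSpec R (some a) r

lemma enum_foldl_single (P : Char → Bool) (rest : List Char) (k : Int) (acc : Int) :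
    (PySem.List.enumerate rest k).foldl (fun c p => if P p.2 then c + 1 else c) acc
    = acc + (rest.countP P : Int) := by
  induction rest generalizing k acc with
  | nil => simp [PySem.List.enumerate_nil]
  | cons a r ih =>
      rw [PySem.List.enumerate_cons]
      simp only [List.foldl_cons, List.countP_cons]
      rw [ih]
      by_cases h : P a <;> simp [h] <;> push_cast <;> ring

lemma enum_foldl_next (Q : Char → Option Char → Bool) (rest pre : List Char) (acc : Int) :
    (PySem.List.enumerate rest (pre.length : Int)).foldl
      (fun c p => if Q p.2 (PySem.List.pyGet? (pre ++ rest) (p.1 + 1)) then c + 1 else c) acc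
    = acc + nextSpec Q rest := by
  induction rest generalizing pre acc with
  | nil => simp [PySem.List.enumerate_nil, nextSpec]
  | cons a r ih =>
      rw [PySem.List.enumerate_cons, List.foldl_cons]
      have hget : PySem.List.pyGet? (pre ++ a :: r) ((pre.length : Int) + 1) = r.head? := by
        rw [show ((pre.length : Int) + 1) = ((pre.length : Int) + (1 : Nat)) from by push_cast; ring]
        rw [PySem.List.pyGet?_append_right]
        cases r <;> simp
      rw [hget]
      have hstep : ∀ acc', (PySem.List.enumerate r ((pre.length : Int) + 1)).foldl
          (fun c p => if Q p.2 (PySem.List.pyGet? (pre ++ a :: r) (p.1 + 1)) then c + 1 else c) acc'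
          = acc' + nextSpec Q r := by
        intro acc'
        have h2 : pre ++ a :: r = (pre ++ [a]) ++ r := by simp
        have h3 : ((pre.length : Int) + 1) = (((pre ++ [a]).length : Nat) : Int) := by simp
        rw [h2, h3, ih]
      rw [hstep]
      simp only [nextSpec]
      split_ifs <;> ring

lemma enum_foldl_prev (R : Char → Option Char → Bool) (rest pre : List Char) (acc : Int)
    (prevc : Option Char)
    (hprev : prevc = (if pre = [] then (pre ++ rest).getLast? else pre.getLast?)) :
    (PySem.List.enumerate rest (pre.length : Int)).foldl
      (fun c p => if R p.2 (PySem.List.pyGet? (pre ++ rest) (p.1 - 1)) then c + 1 else c) acc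
    = acc + prevSpec R prevc rest := by
  induction rest generalizing pre acc prevc with
  | nil => simp [PySem.List.enumerate_nil, prevSpec]
  | cons a r ih =>
      rw [PySem.List.enumerate_cons, List.foldl_cons]
      have hget : PySem.List.pyGet? (pre ++ a :: r) ((pre.length : Int) - 1) = prevc := by
        subst hprev
        by_cases hp : pre = []
        · subst hp
          simp [PySem.List.pyGet?_neg_one]
        · have hlen : 1 ≤ pre.length := List.length_pos_of_ne_nil hp
          have h1 : ((pre.length : Int) - 1) = ((pre.length - 1 : Nat) : Int) := by omega
          rw [h1, PySem.List.pyGet?_natCast]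
          rw [List.getElem?_append_left (by omega)]
          simp [hp, List.getLast?_eq_getElem?]
      rw [hget]
      have hstep : ∀ acc', (PySem.List.enumerate r ((pre.length : Int) + 1)).foldl
          (fun c p => if R p.2 (PySem.List.pyGet? (pre ++ a :: r) (p.1 - 1)) then c + 1 else c) acc'
          = acc' + prevSpec R (some a) r := by
        intro acc'
        have h2 : pre ++ a :: r = (pre ++ [a]) ++ r := by simp
        have h3 : ((pre.length : Int) + 1) = (((pre ++ [a]).length : Nat) : Int) := by simp
        rw [h2, h3, ih]
        simp
      rw [hstep]
      simp only [prevSpec]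
      split_ifs <;> ring

-- ---- closed forms of nextSpec/prevSpec on cs ++ ['a'] for each two-char element ----
lemma nextSpec_br (cs : List Char) :
    nextSpec (fun s o => (s == 'B' && o == some 'r') || (s == 'b' && o == some 'r')) (cs ++ ['a'])
    = pyPairs cs ['b', 'B'] 'r' := by
  induction cs with
  | nil => simp [nextSpec, pyPairs]
  | cons a r ih =>
      cases r with
      | nil => simp [nextSpec, pyPairs]; try (split_ifs <;> simp_all <;> first | omega | tauto)
      | cons b r' =>
          simp only [List.cons_append, nextSpec, List.head?] at *
          rw [ih]
          simp only [pyPairs, List.zip, List.tail, List.zipWith, List.countP_cons]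
          split_ifs <;> simp_all <;> first | omega | tauto

lemma nextSpec_na (cs : List Char) :
    nextSpec (fun s o => (s == 'N' && o == some 'a') || (s == 'n' && o == some 'a')) (cs ++ ['a'])
    = pyPairs cs ['n', 'N'] 'a'
      + (if cs.getLast? = some 'n' ∨ cs.getLast? = some 'N' then 1 else 0) := by
  induction cs with
  | nil => simp [nextSpec, pyPairs]
  | cons a r ih =>
      cases r with
      | nil => simp [nextSpec, pyPairs]; try (split_ifs <;> simp_all <;> first | omega | tauto)
      | cons b r' =>
          simp only [List.cons_append, nextSpec, List.head?] at *
          rw [ih]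
          simp only [pyPairs, List.zip, List.tail, List.zipWith, List.countP_cons, List.getLast?_cons_cons]
          split_ifs <;> simp_all <;> first | omega | tauto

lemma nextSpec_c (cs : List Char) :
    nextSpec (fun s o => (s == 'c' || s == 'C') && !(o == some 'l')) (cs ++ ['a'])
    = (cs.countP (fun ch => (['c', 'C'] : List Char).contains ch) : Int) - pyPairs cs ['c', 'C'] 'l' := by
  induction cs with
  | nil => simp [nextSpec, pyPairs]
  | cons a r ih =>
      cases r with
      | nil => simp [nextSpec, pyPairs, List.countP_cons]; try (split_ifs <;> simp_all <;> first | omega | tauto)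
      | cons b r' =>
          simp only [List.cons_append, nextSpec, List.head?] at *
          rw [ih]
          simp only [pyPairs, List.zip, List.tail, List.zipWith, List.countP_cons]
          split_ifs <;> simp_all <;> first | omega | tauto

lemma prevSpec_cl_key (cs : List Char) (prev : Char) :
    prevSpec (fun s p => (s == 'l' && p == some 'C') || (s == 'l' && p == some 'c')) (some prev) (cs ++ ['a'])
    = (if (cs.headD 'a') = 'l' ∧ (prev = 'C' ∨ prev = 'c') then 1 else 0) + pyPairs cs ['c', 'C'] 'l' := by
  induction cs generalizing prev with
  | nil => simp [prevSpec, pyPairs]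
  | cons a r ih =>
      cases r with
      | nil =>
          clear ih
          simp only [List.cons_append, List.nil_append, prevSpec, pyPairs, List.zip, List.tail,
            List.zipWith, List.countP_nil, List.headD]
          split_ifs <;> simp_all <;> first | omega | tauto
      | cons b r' =>
          simp only [List.cons_append, prevSpec] at *
          rw [ih]
          simp only [pyPairs, List.zip, List.tail, List.zipWith, List.countP_cons, List.headD]
          split_ifs <;> simp_all <;> first | omega | tauto

lemma prevSpec_cl (cs : List Char) :
    prevSpec (fun s p => (s == 'l' && p == some 'C') || (s == 'l' && p == some 'c')) (some 'a') (cs ++ ['a'])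
    = pyPairs cs ['c', 'C'] 'l' := by
  rw [prevSpec_cl_key]
  simp

-- ---- PySem.Chars.count is invariant under appending the sentinel 'a' for Pt/Sn/@ ----
-- reference count for nonempty sub: the non-overlapping scan PySem.Chars.count.go performs
def scnt (sub : List Char) : List Char → Nat
  | [] => 0
  | a :: t => if sub.isPrefixOf (a :: t) then 1 + scnt sub (t.drop (sub.length - 1)) else scnt sub t
  termination_by l => l.length
  decreasing_by all_goals (simp; try omega)

lemma count_go_eq_scnt (sub : List Char) (hsub : sub ≠ []) :
    ∀ (fuel : Nat) (l : List Char) (acc : Nat), l.length ≤ fuel →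
      PySem.Chars.count.go sub fuel l acc = acc + scnt sub l := by
  have hlen1 : 1 ≤ sub.length := List.length_pos_of_ne_nil hsub
  intro fuel
  induction fuel with
  | zero =>
      intro l acc h
      have hl : l = [] := List.eq_nil_of_length_eq_zero (by omega)
      subst hl
      simp [PySem.Chars.count.go, scnt]
  | succ n ih =>
      intro l acc h
      cases l with
      | nil => simp [PySem.Chars.count.go, scnt]
      | cons a t =>
          rw [PySem.Chars.count.go]
          simp only [List.length_cons] at h
          by_cases hp : sub.isPrefixOf (a :: t)
          · have hd : (a :: t).drop sub.length = t.drop (sub.length - 1) := by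
              cases sub with
              | nil => exact absurd rfl hsub
              | cons s ss => simp
            simp only [hp, if_true]
            rw [hd, ih (t.drop (sub.length - 1)) (acc + 1) (by simp; omega)]
            rw [scnt]
            simp [hp]
            omega
          · simp only [hp, if_false]
            rw [ih t acc (by omega)]
            rw [scnt]
            simp [hp]

lemma scnt_append_singleton (sub : List Char) (hsub : sub ≠ []) (x : Char)
    (hx : sub.getLast? ≠ some x) :
    ∀ (n : Nat) (cs : List Char), cs.length ≤ n → scnt sub (cs ++ [x]) = scnt sub cs := by
  have hlen1 : 1 ≤ sub.length := List.length_pos_of_ne_nil hsub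
  intro n
  induction n with
  | zero =>
      intro cs h
      have hl : cs = [] := List.eq_nil_of_length_eq_zero (by omega)
      subst hl
      rw [scnt]
      have : ¬ sub.isPrefixOf [x] := by
        intro hp
        rw [List.isPrefixOf_iff_prefix] at hp
        have := List.IsPrefix.length_le hp
        simp at this
        have hsx : sub = [x] := by
          rcases hp with ⟨r, hr⟩
          cases sub with
          | nil => exact absurd rfl hsub
          | cons s ss =>
              cases ss with
              | nil => simp_all
              | cons u us => simp_all
        rw [hsx] at hx; simp at hx
      simp [this, scnt]
  | succ n ih =>
      intro cs h
      cases cs with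
      | nil =>
          exact ih [] (by simp)
      | cons a t =>
          simp only [List.length_cons] at h
          have hpfx : sub.isPrefixOf (a :: (t ++ [x])) = sub.isPrefixOf (a :: t) := by
            rw [show a :: (t ++ [x]) = (a :: t) ++ [x] from by simp]
            rw [Bool.eq_iff_iff, List.isPrefixOf_iff_prefix, List.isPrefixOf_iff_prefix]
            constructor
            · intro hp
              have hle := List.IsPrefix.length_le hp
              simp at hle
              by_cases hcase : sub.length ≤ (a :: t).length
              · have hs := List.prefix_iff_eq_take.mp hp
                rw [List.take_append_of_le_length hcase] at hs
                rw [hs]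
                exact List.take_prefix _ _
              · have hforce : sub.length = (a :: t).length + 1 := by simp at hcase ⊢; omega
                have heq : sub = (a :: t) ++ [x] := by
                  have hs := List.prefix_iff_eq_take.mp hp
                  rw [hs, List.take_of_length_le (by simp [hforce])]
                refine absurd ?_ hx
                rw [heq]
                exact List.getLast?_concat
            · intro hp; exact hp.trans (List.prefix_append _ _)
          rw [List.cons_append, scnt, hpfx]
          by_cases hp : sub.isPrefixOf (a :: t)
          · simp only [hp, if_true]
            have hdrop : (t ++ [x]).drop (sub.length - 1) = t.drop (sub.length - 1) ++ [x] := by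
              have hle : sub.length ≤ (a :: t).length :=
                List.IsPrefix.length_le (List.isPrefixOf_iff_prefix.mp hp)
              rw [List.drop_append_of_le_length (by simp at hle ⊢; omega)]
            rw [hdrop, ih (t.drop (sub.length - 1)) (by simp; omega)]
            rw [scnt]
            simp [hp]
          · simp only [hp, if_false]
            rw [ih t (by omega)]
            rw [scnt]
            simp [hp]

lemma count_append_a (cs : List Char) (sub : List Char) (hsub : sub ≠ [])
    (hx : sub.getLast? ≠ some 'a') :
    PySem.Chars.count (cs ++ ['a']) sub = PySem.Chars.count cs sub := by
  have hne : sub.isEmpty = false := by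
    cases sub with
    | nil => exact absurd rfl hsub
    | cons a t => rfl
  rw [PySem.Chars.count, PySem.Chars.count, hne]
  simp only [Bool.false_eq_true, if_false]
  rw [count_go_eq_scnt sub hsub _ _ 0 (le_refl _), count_go_eq_scnt sub hsub _ _ 0 (le_refl _)]
  rw [scnt_append_singleton sub hsub 'a' hx cs.length cs (le_refl _)]

-- ===== VERDICT (by name: the statement is the Claim_ definition above) =====
lemma enum_foldl_next0 (Q : Char → Option Char → Bool) (t : List Char) (acc : Int) :
    (PySem.List.enumerate t 0).foldl
      (fun c p => if Q p.2 (PySem.List.pyGet? t (p.1 + 1)) then c + 1 else c) acc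
    = acc + nextSpec Q t := by
  have h := enum_foldl_next Q t [] acc
  simpa using h

lemma enum_foldl_prev0 (R : Char → Option Char → Bool) (t : List Char) (acc : Int) :
    (PySem.List.enumerate t 0).foldl
      (fun c p => if R p.2 (PySem.List.pyGet? t (p.1 - 1)) then c + 1 else c) acc
    = acc + prevSpec R t.getLast? t := by
  have h := enum_foldl_prev R t [] acc t.getLast? (by simp)
  simpa using h

lemma countP_aux (cs : List Char) (x y : Char) (hxy : x ≠ 'a' ∧ y ≠ 'a') :
    (cs ++ ['a']).countP (fun ch => ch == x || ch == y) = cs.countP (fun ch => (([x, y] : List Char)).contains ch) := by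
  rw [List.countP_append]
  have h1 : ([('a' : Char)].countP (fun ch => ch == x || ch == y)) = 0 := by
    simp [List.countP_cons]
    exact ⟨fun h => hxy.1 h.symm, fun h => hxy.2 h.symm⟩
  rw [h1, Nat.add_zero]
  apply List.countP_congr
  intro ch _
  simp [List.contains_cons]

theorem num_element_spec : Claim_unchanged_num_element := by
  intro smile element hdom
  unfold Spec_num_element
  intro hnd
  by_cases hc : element = "c"
  · subst hc
    simp only [num_element, num_element_alt, String.reduceBEq, BEq.rfl, if_true, if_false,
      Bool.false_eq_true, ite_true, ite_false]
    rw [enum_foldl_next0 (fun s o => (s == 'c' || s == 'C') && !(o == some 'l'))]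
    rw [nextSpec_c]
    ring
  by_cases ho : element = "o"
  · subst ho
    simp only [num_element, num_element_alt, String.reduceBEq, BEq.rfl, if_true, if_false,
      Bool.false_eq_true, ite_true, ite_false]
    rw [enum_foldl_single (fun s => s == 'o' || s == 'O')]
    rw [countP_aux smile.toList 'o' 'O' (by decide)]
    ring
  by_cases hn : element = "n"
  · subst hn
    simp only [num_element, num_element_alt, String.reduceBEq, BEq.rfl, if_true, if_false,
      Bool.false_eq_true, ite_true, ite_false]
    rw [enum_foldl_single (fun s => s == 'n' || s == 'N')]
    rw [countP_aux smile.toList 'n' 'N' (by decide)]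
    ring
  by_cases hs : element = "s"
  · subst hs
    simp only [num_element, num_element_alt, String.reduceBEq, BEq.rfl, if_true, if_false,
      Bool.false_eq_true, ite_true, ite_false]
    rw [enum_foldl_single (fun s => s == 'S' || s == 's')]
    rw [show ((smile.toList ++ ['a']).countP (fun s => s == 'S' || s == 's'))
        = smile.toList.countP (fun ch => (['s', 'S'] : List Char).contains ch) from ?_]
    · ring
    · rw [show (fun s => s == 'S' || s == 's') = (fun s : Char => s == 's' || s == 'S') from by
        funext ch; simp [Bool.or_comm]]
      exact countP_aux smile.toList 's' 'S' (by decide)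
  by_cases hcl : element = "cl"
  · subst hcl
    simp only [num_element, num_element_alt, String.reduceBEq, BEq.rfl, if_true, if_false,
      Bool.false_eq_true, ite_true, ite_false]
    rw [enum_foldl_prev0 (fun s p => (s == 'l' && p == some 'C') || (s == 'l' && p == some 'c'))]
    rw [show (smile.toList ++ ['a']).getLast? = some 'a' from List.getLast?_concat]
    rw [prevSpec_cl]
    ring
  by_cases hbr : element = "br"
  · subst hbr
    simp only [num_element, num_element_alt, String.reduceBEq, BEq.rfl, if_true, if_false,
      Bool.false_eq_true, ite_true, ite_false]
    rw [enum_foldl_next0 (fun s o => (s == 'B' && o == some 'r') || (s == 'b' && o == some 'r'))]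
    rw [nextSpec_br]
    ring
  by_cases hf : element = "f"
  · subst hf
    simp only [num_element, num_element_alt, String.reduceBEq, BEq.rfl, if_true, if_false,
      Bool.false_eq_true, ite_true, ite_false]
    rw [enum_foldl_single (fun s => s == 'F' || s == 'f')]
    rw [show (fun s => s == 'F' || s == 'f') = (fun s : Char => s == 'f' || s == 'F') from by
      funext ch; simp [Bool.or_comm]]
    rw [countP_aux smile.toList 'f' 'F' (by decide)]
    ring
  by_cases hi : element = "i"
  · subst hi
    simp only [num_element, num_element_alt, String.reduceBEq, BEq.rfl, if_true, if_false,
      Bool.false_eq_true, ite_true, ite_false]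
    rw [enum_foldl_single (fun s => s == 'I' || s == 'i')]
    rw [show (fun s => s == 'I' || s == 'i') = (fun s : Char => s == 'i' || s == 'I') from by
      funext ch; simp [Bool.or_comm]]
    rw [countP_aux smile.toList 'i' 'I' (by decide)]
    ring
  by_cases hna : element = "na"
  · subst hna
    have hlast : ¬ (smile.toList.getLast? = some 'n' ∨ smile.toList.getLast? = some 'N') := by
      intro h
      exact hnd ⟨rfl, h⟩
    simp only [num_element, num_element_alt, String.reduceBEq, BEq.rfl, if_true, if_false,
      Bool.false_eq_true, ite_true, ite_false]
    rw [enum_foldl_next0 (fun s o => (s == 'N' && o == some 'a') || (s == 'n' && o == some 'a'))]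
    rw [nextSpec_na]
    simp [hlast]
  by_cases hpt : element = "pt"
  · subst hpt
    simp only [num_element, num_element_alt, String.reduceBEq, BEq.rfl, if_true, if_false,
      Bool.false_eq_true, ite_true, ite_false]
    rw [count_append_a smile.toList ['P', 't'] (by decide) (by decide)]
    split_ifs <;> omega
  by_cases hsn : element = "sn"
  · subst hsn
    simp only [num_element, num_element_alt, String.reduceBEq, BEq.rfl, if_true, if_false,
      Bool.false_eq_true, ite_true, ite_false]
    rw [count_append_a smile.toList ['S', 'n'] (by decide) (by decide)]
    split_ifs <;> omega
  by_cases hat : element = "@"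
  · subst hat
    simp only [num_element, num_element_alt, String.reduceBEq, BEq.rfl, if_true, if_false,
      Bool.false_eq_true, ite_true, ite_false]
    rw [count_append_a smile.toList ['@'] (by decide) (by decide)]
    split_ifs <;> omega
  -- unrecognized element: both sides are 0
  have e1 : (element == "c") = false := beq_eq_false_iff_ne.mpr hc
  have e2 : (element == "o") = false := beq_eq_false_iff_ne.mpr ho
  have e3 : (element == "n") = false := beq_eq_false_iff_ne.mpr hn
  have e4 : (element == "s") = false := beq_eq_false_iff_ne.mpr hs
  have e5 : (element == "cl") = false := beq_eq_false_iff_ne.mpr hcl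
  have e6 : (element == "br") = false := beq_eq_false_iff_ne.mpr hbr
  have e7 : (element == "f") = false := beq_eq_false_iff_ne.mpr hf
  have e8 : (element == "i") = false := beq_eq_false_iff_ne.mpr hi
  have e9 : (element == "na") = false := beq_eq_false_iff_ne.mpr hna
  have e10 : (element == "pt") = false := beq_eq_false_iff_ne.mpr hpt
  have e11 : (element == "sn") = false := beq_eq_false_iff_ne.mpr hsn
  have e12 : (element == "@") = false := beq_eq_false_iff_ne.mpr hat
  have hid : ∀ (l : List (Int × Char)) (a : Int), l.foldl (fun c (_ : Int × Char) => c) a = a := by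
    intro l
    induction l with
    | nil => intro a; rfl
    | cons p r ih => intro a; simp [List.foldl, ih]
  simp only [num_element, num_element_alt, e1, e2, e3, e4, e5, e6, e7, e8, e9, e10, e11, e12,
    Bool.false_eq_true, if_false, ite_false]
  exact hid _ 0


theorem num_element_changed : Claim_changed_num_element := by
  unfold Claim_changed_num_element; decide

theorem num_element_tight : Claim_exact_num_element := by
  intro smile element hdom hd
  obtain ⟨hna, hlast⟩ := hd
  subst hna
  simp only [num_element, num_element_alt, String.reduceBEq, BEq.rfl, if_true, if_false,
    Bool.false_eq_true, ite_true, ite_false]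
  rw [enum_foldl_next0 (fun s o => (s == 'N' && o == some 'a') || (s == 'n' && o == some 'a'))]
  rw [nextSpec_na]
  simp [hlast]
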